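-- pv_equiv track=rewrite | github.com/tanjingjing123/LeetcodeAlgorithms | divideArrayInSetsOfKConsecutiveNums.py | isPossible
-- ===== SOURCE A (Python) =====
-- import heapq
--
-- def isPossible(nums, k):
--     nums.sort()
--     sequences = dict()
--     for num in nums:
--         current_size, res = 1, True
--         if num - 1 in sequences.keys() and sequences[num - 1]:
--             current_size = heapq.heappop(sequences[num - 1])
--             current_size += 1
--         if current_size < k:
--             if num in sequences.keys():
--                 heapq.heappush(sequences[num], current_size)
--             else:
--                 sequences[num] = [current_size]
--     for v in sequences.values():
--         if v: return False
--     return True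
--
-- nums = [3,2,1,2,3,4,3,4,5,9,10,11]
--
-- k = 3
-- ===== SOURCE B (Python) =====
-- # B: single pass over the sorted list in runs of equal values, keeping only the
-- # sizes of currently-open runs ending at the previous value (no dict, no heap).
-- # Like A, it sorts nums in place; the equivalence claimed is about the return value.
-- def isPossible(nums, k):
--     nums.sort()
--     opens = []          # sizes (each < k) of open runs ending at prev
--     prev = None
--     i = 0
--     n = len(nums)
--     while i < n:
--         v = nums[i]
--         j = i
--         while j < n and nums[j] == v:
--             j += 1
--         m = j - i
--         if opens:
--             if v != prev + 1 or m < len(opens):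
--                 return False
--         opens = [s for s in [x + 1 for x in opens] + [1] * (m - len(opens)) if s < k]
--         prev = v
--         i = j
--     return not opens
-- ===== Notes on version B (the rewrite author's own statement) =====
-- stated objective: simpler
-- what changed: Replaces A's dict-of-min-heaps keyed by run end value with a single pass over the sorted list in runs of equal values, keeping only the list of sizes of currently-open runs and returning False early, with no dict and no heap.
import Mathlib
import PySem

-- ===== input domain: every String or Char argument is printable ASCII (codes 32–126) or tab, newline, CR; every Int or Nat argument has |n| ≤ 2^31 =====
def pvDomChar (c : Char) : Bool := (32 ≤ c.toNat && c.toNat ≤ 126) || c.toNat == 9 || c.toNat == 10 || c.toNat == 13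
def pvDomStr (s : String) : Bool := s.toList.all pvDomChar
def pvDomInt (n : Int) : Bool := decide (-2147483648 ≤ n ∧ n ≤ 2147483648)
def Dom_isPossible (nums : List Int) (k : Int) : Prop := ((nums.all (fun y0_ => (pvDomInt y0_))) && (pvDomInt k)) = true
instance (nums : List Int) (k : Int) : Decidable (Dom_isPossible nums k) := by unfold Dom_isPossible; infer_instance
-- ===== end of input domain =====

-- B replaces A's dict-of-heaps with one grouped pass keeping only the open-run sizes (objective: simpler).
-- Both A and B sort nums in place in Python; the equivalence claimed is about the return value only.

-- ===== PORT A =====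
-- heapq model: the heap lists are only ever observed through heappop, which returns the
-- minimum element; heappush appends, heappop removes one minimum occurrence — observably
-- identical to heapq's binary heap for these Int lists.
def heapPopMin (l : List Int) : Int × List Int :=
  let m := l.min?.getD 0
  (m, l.erase m)

def stepA (k : Int) (d : PySem.Dict Int (List Int)) (num : Int) : PySem.Dict Int (List Int) :=
  -- one iteration of A's first for-loop: current_size = 1; pop from sequences[num-1] if nonempty; push if < k
  let p := d.getD (num - 1) []
  if p ≠ [] then
    let q := heapPopMin p
    let cs := q.1 + 1
    let d1 := d.insert (num - 1) q.2
    if cs < k then d1.insert num (d1.getD num [] ++ [cs]) else d1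
  else
    if (1 : Int) < k then d.insert num (d.getD num [] ++ [1]) else d

def isPossible (nums : List Int) (k : Int) : Bool :=
  let L := PySem.List.sorted nums (fun x => x) false
  let d := L.foldl (stepA k) PySem.Dict.empty
  d.values.all (fun l => l == ([] : List Int))

-- ===== PORT B =====
-- Source B's outer while loop over runs of equal values; prev starts as Python's None, read
-- only when opens ≠ [] (by then it has been set), so it is carried as an Int starting at 0.
def bGo (k : Int) : List Int → Int → List Int → Bool
  | [], _, opens => opens == []
  | v :: rest, prev, opens =>
      let same := rest.takeWhile (fun x => x == v)
      let rest' := rest.dropWhile (fun x => x == v)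
      let m : Nat := same.length + 1
      if opens ≠ [] ∧ (v ≠ prev + 1 ∨ m < opens.length) then false
      else bGo k rest' v ((opens.map (· + 1) ++ List.replicate (m - opens.length) 1).filter (fun s => decide (s < k)))
  termination_by L => L.length
  decreasing_by
    have h := (List.dropWhile_sublist (l := rest) (p := fun x => x == v)).length_le
    simpa using Nat.lt_succ_of_le h

def isPossible_alt (nums : List Int) (k : Int) : Bool :=
  bGo k (PySem.List.sorted nums (fun x => x) false) 0 []

-- ===== PRECONDITION & SPEC =====
def Spec_isPossible (nums : List Int) (k : Int) (out : Bool) : Prop := out = isPossible_alt nums k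
instance (nums : List Int) (k : Int) (out : Bool) : Decidable (Spec_isPossible nums k out) := by unfold Spec_isPossible; infer_instance

-- ===== CLAIM (what is proved, stated in full; the proofs are below) =====
def Claim_equal_isPossible : Prop := ∀ (nums : List Int) (k : Int), Dom_isPossible nums k → Spec_isPossible nums k (isPossible nums k)

-- ===== LEMMAS AND PROOFS =====

-- the final check "for v in sequences.values(): if v: return False; return True"
theorem allEmpty_true (d : PySem.Dict Int (List Int)) (hnd : d.keys.Nodup)
    (h : ∀ key, d.getD key [] = []) : (d.values.all (fun l => l == ([] : List Int))) = true := by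
  rw [PySem.Dict.values_eq_map_keys d hnd []]
  simp only [List.all_map, List.all_eq_true]
  intro k _
  simp [h k]

theorem allEmpty_false (d : PySem.Dict Int (List Int)) (hnd : d.keys.Nodup) (key : Int)
    (h : d.getD key [] ≠ []) : (d.values.all (fun l => l == ([] : List Int))) = false := by
  have hk : key ∈ d.keys := by
    by_contra hk
    exact h (by rw [PySem.Dict.getD_eq_get?_getD, (PySem.Dict.get?_eq_none_iff_not_mem_keys d key).2 hk]; rfl)
  rw [PySem.Dict.values_eq_map_keys d hnd []]
  simp only [List.all_map, List.all_eq_false]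
  exact ⟨key, hk, by simpa using h⟩

theorem stepA_nodup (k : Int) (d : PySem.Dict Int (List Int)) (num : Int)
    (hnd : d.keys.Nodup) : (stepA k d num).keys.Nodup := by
  by_cases hp : d.getD (num - 1) [] = [] <;>
    simp only [stepA, hp, ne_eq, not_true_eq_false, not_false_eq_true, if_true, if_false] <;>
    split_ifs <;> simp [PySem.Dict.nodup_keys_insert, hnd]

theorem stepA_untouched (k : Int) (d : PySem.Dict Int (List Int)) (num key : Int)
    (h1 : key ≠ num - 1) (h2 : key ≠ num) :
    (stepA k d num).getD key [] = d.getD key [] := by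
  by_cases hp : d.getD (num - 1) [] = [] <;>
    simp only [stepA, hp, ne_eq, not_true_eq_false, not_false_eq_true, if_true, if_false] <;>
    split_ifs <;> simp [PySem.Dict.getD_insert, h1, h2]

theorem heapPopMin_perm (l : List Int) (h : l ≠ []) :
    l.Perm ((heapPopMin l).1 :: (heapPopMin l).2) := by
  obtain ⟨m, hm⟩ : ∃ m, l.min? = some m := by
    cases l with
    | nil => exact absurd rfl h
    | cons a as => exact ⟨_, rfl⟩
  have hmem : m ∈ l := List.min?_mem hm
  unfold heapPopMin
  rw [hm]
  simpa using List.perm_cons_erase hmem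

-- effect of A's loop on one run of m equal values v: it drains the heap at v-1,
-- extending each drained size by 1 (kept if < k) and starting fresh runs of size 1
theorem drain (k v : Int) : ∀ (m : Nat) (d : PySem.Dict Int (List Int)),
    d.keys.Nodup →
    (∀ key, key ≠ v - 1 → key ≠ v → d.getD key [] = []) →
    (((List.replicate m v).foldl (stepA k) d).keys.Nodup ∧
     (∀ key, key ≠ v - 1 → key ≠ v → ((List.replicate m v).foldl (stepA k) d).getD key [] = []) ∧
     (if m < (d.getD (v-1) []).length
      then (((List.replicate m v).foldl (stepA k) d).getD (v-1) []).length = (d.getD (v-1) []).length - m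
      else ((List.replicate m v).foldl (stepA k) d).getD (v-1) [] = [] ∧
        (((List.replicate m v).foldl (stepA k) d).getD v []).Perm
          (d.getD v [] ++ ((d.getD (v-1) []).map (· + 1) ++ List.replicate (m - (d.getD (v-1) []).length) 1).filter (fun s => decide (s < k))))) := by
  intro m
  induction m with
  | zero =>
      intro d hnd hout
      refine ⟨hnd, hout, ?_⟩
      split_ifs with h0
      · simp
      · have hnil : d.getD (v-1) [] = [] := by
          have := List.eq_nil_of_length_eq_zero (by omega : (d.getD (v-1) []).length = 0)
          exact this
        simp [hnil]
  | succ m ih =>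
      intro d hnd hout
      have hne : v ≠ v - 1 := by omega
      have hfold : (List.replicate (m+1) v).foldl (stepA k) d
          = (List.replicate m v).foldl (stepA k) (stepA k d v) := by
        rw [List.replicate_succ, List.foldl_cons]
      by_cases hp : d.getD (v - 1) [] = []
      · -- no open run ends at v-1: start a fresh run of size 1 (kept iff 1 < k)
        have hstep : stepA k d v = (if (1 : Int) < k then d.insert v (d.getD v [] ++ [1]) else d) := by
          simp [stepA, hp]
        have h2a : (stepA k d v).getD (v-1) [] = [] := by
          rw [hstep]; split_ifs <;> simp [PySem.Dict.getD_insert, hp]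
        have h2b : (stepA k d v).getD v [] = d.getD v [] ++ (if (1:Int) < k then [1] else []) := by
          rw [hstep]; split_ifs <;> simp
        have h2nd := stepA_nodup k d v hnd
        have h2out : ∀ key, key ≠ v - 1 → key ≠ v → (stepA k d v).getD key [] = [] := by
          intro key hk1 hk2
          rw [stepA_untouched k d v key hk1 hk2]; exact hout key hk1 hk2
        obtain ⟨ind, iout, imain⟩ := ih (stepA k d v) h2nd h2out
        rw [hfold]
        refine ⟨ind, iout, ?_⟩
        rw [h2a] at imain
        simp only [List.length_nil, Nat.not_lt_zero, if_false] at imain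
        rw [hp]
        simp only [List.length_nil, Nat.not_lt_zero, if_false, Nat.sub_zero, List.map_nil,
          List.nil_append]
        refine ⟨imain.1, ?_⟩
        refine imain.2.trans ?_
        rw [h2b, List.replicate_succ, List.filter_cons]
        by_cases hc : (1:Int) < k <;> simp [hc, List.append_assoc]
      · -- pop one (minimal) open run ending at v-1, extend it to size q.1+1
        set q := heapPopMin (d.getD (v-1) []) with hq
        have hperm : (d.getD (v-1) []).Perm (q.1 :: q.2) := heapPopMin_perm _ hp
        have hplen : (d.getD (v-1) []).length = q.2.length + 1 := by
          have := hperm.length_eq; simpa using this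
        have hstep : stepA k d v =
            (if q.1 + 1 < k then (d.insert (v-1) q.2).insert v (d.getD v [] ++ [q.1+1])
             else d.insert (v-1) q.2) := by
          simp [stepA, hp, PySem.Dict.getD_insert, hne, ← hq]
        have h2a : (stepA k d v).getD (v-1) [] = q.2 := by
          rw [hstep]; split_ifs <;> simp [PySem.Dict.getD_insert]

        have h2b : (stepA k d v).getD v [] = d.getD v [] ++ (if q.1 + 1 < k then [q.1+1] else []) := by
          rw [hstep]; split_ifs <;> simp [PySem.Dict.getD_insert, hne]
        have h2nd := stepA_nodup k d v hnd
        have h2out : ∀ key, key ≠ v - 1 → key ≠ v → (stepA k d v).getD key [] = [] := by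
          intro key hk1 hk2
          rw [stepA_untouched k d v key hk1 hk2]; exact hout key hk1 hk2
        obtain ⟨ind, iout, imain⟩ := ih (stepA k d v) h2nd h2out
        rw [hfold]
        refine ⟨ind, iout, ?_⟩
        rw [h2a] at imain
        split_ifs with hlt
        · -- still more opens than copies: lengths only
          have : m < q.2.length := by omega
          rw [if_pos this] at imain
          rw [imain]; omega
        · have : ¬ (m < q.2.length) := by omega
          rw [if_neg this] at imain
          refine ⟨imain.1, ?_⟩
          refine imain.2.trans ?_
          rw [h2b]
          have hrepl : m + 1 - (d.getD (v-1) []).length = m - q.2.length := by omega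
          have hmap : ((d.getD (v-1) []).map (· + 1)).Perm ((q.1 + 1) :: q.2.map (· + 1)) := by
            simpa using hperm.map (· + 1)
          have happ : (((d.getD (v-1) []).map (· + 1)) ++ List.replicate (m + 1 - (d.getD (v-1) []).length) 1).Perm
              (((q.1 + 1) :: q.2.map (· + 1)) ++ List.replicate (m - q.2.length) 1) := by
            rw [hrepl]; exact hmap.append_right _
          refine List.Perm.trans ?_ ((List.Perm.append_left _ (happ.filter _)).symm)
          rw [List.cons_append, List.filter_cons]
          by_cases hc : q.1 + 1 < k <;> simp [hc, List.append_assoc]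

-- leftover lists at keys the rest of the (sorted) fold can never touch persist to the end
theorem dead (k key : Int) : ∀ (L : List Int) (d : PySem.Dict Int (List Int)),
    d.keys.Nodup → (∀ x ∈ L, key < x - 1) → d.getD key [] ≠ [] →
    ((L.foldl (stepA k) d).values.all (fun l => l == ([] : List Int))) = false
  | [], d, hnd, _, h => allEmpty_false d hnd key h
  | x :: L, d, hnd, hfar, h => by
      have hx := hfar x (by simp)
      refine dead k key L (stepA k d x) (stepA_nodup k d x hnd) (fun y hy => hfar y (by simp [hy])) ?_
      rw [stepA_untouched k d x key (by omega) (by omega)]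
      exact h

theorem takeWhile_all_eq (v : Int) (rest : List Int) :
    v :: rest.takeWhile (fun x => x == v) = List.replicate ((rest.takeWhile (fun x => x == v)).length + 1) v := by
  rw [List.replicate_succ]
  congr 1
  apply List.eq_replicate_of_mem
  intro b hb
  simpa using List.mem_takeWhile_imp hb

theorem dropWhile_gt (v : Int) : ∀ (rest : List Int), rest.Pairwise (· ≤ ·) → (∀ x ∈ rest, v ≤ x) →
    ∀ x ∈ rest.dropWhile (fun x => x == v), v < x
  | [], _, _ => by simp
  | y :: t, hp, hle => by
      by_cases hy : y = v
      · rw [List.dropWhile_cons_of_pos (by simp [hy])]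
        exact dropWhile_gt v t hp.of_cons (fun x hx => hle x (by simp [hx]))
      · rw [List.dropWhile_cons_of_neg (by simp [hy])]
        intro x hx
        rcases List.mem_cons.mp hx with rfl | hx
        · have := hle x (by simp); omega
        · have h1 := (List.pairwise_cons.mp hp).1 x hx
          have h2 := hle y (by simp)
          omega

theorem main_base (d : PySem.Dict Int (List Int)) (prev : Int) (opens : List Int)
    (hnd : d.keys.Nodup)
    (hout : ∀ key, key ≠ prev → d.getD key [] = [])
    (hperm : (d.getD prev []).Perm opens) :
    (d.values.all (fun l => l == ([] : List Int))) = (opens == []) := by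
  by_cases hop : opens = []
  · subst hop
    have hnil : d.getD prev [] = [] := hperm.eq_nil
    rw [allEmpty_true d hnd ?_]
    · simp
    · intro key
      by_cases hk : key = prev
      · rw [hk]; exact hnil
      · exact hout key hk
  · have hne : d.getD prev [] ≠ [] := fun h => hop ((h ▸ hperm).symm.eq_nil)
    rw [allEmpty_false d hnd prev hne]
    simp [hop]

theorem main_sim (k : Int) : ∀ (n : Nat) (L : List Int), L.length ≤ n → L.Pairwise (· ≤ ·) →
    ∀ (d : PySem.Dict Int (List Int)) (prev : Int) (opens : List Int),
    d.keys.Nodup →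
    (∀ key, key ≠ prev → d.getD key [] = []) →
    (d.getD prev []).Perm opens →
    (opens ≠ [] → ∀ x ∈ L, prev < x) →
    ((L.foldl (stepA k) d).values.all (fun l => l == ([] : List Int))) = bGo k L prev opens := by
  intro n
  induction n with
  | zero =>
      intro L hL _ d prev opens hnd hout hperm _
      have : L = [] := List.eq_nil_of_length_eq_zero (by omega)
      subst this
      simp only [List.foldl_nil, bGo]
      exact main_base d prev opens hnd hout hperm
  | succ n ih =>
      intro L hL hp d prev opens hnd hout hperm hfar
      cases L with
      | nil =>
          simp only [List.foldl_nil, bGo]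
          exact main_base d prev opens hnd hout hperm
      | cons v rest =>
          have hsplit : rest = rest.takeWhile (fun x => x == v) ++ rest.dropWhile (fun x => x == v) :=
            (List.takeWhile_append_dropWhile).symm
          have hL' : (rest.dropWhile (fun x => x == v)).length ≤ n := by
            have h1 := (List.dropWhile_sublist (p := fun x => x == v) (l := rest)).length_le
            simp only [List.length_cons] at hL
            omega
          have hprest := List.pairwise_cons.mp hp
          have hrest'p : (rest.dropWhile (fun x => x == v)).Pairwise (· ≤ ·) :=
            List.Pairwise.sublist (List.dropWhile_sublist _) hprest.2
          have hgt : ∀ x ∈ rest.dropWhile (fun x => x == v), v < x :=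
            dropWhile_gt v rest hprest.2 hprest.1
          have hfold : ((v :: rest).foldl (stepA k) d)
              = (rest.dropWhile (fun x => x == v)).foldl (stepA k)
                  ((List.replicate ((rest.takeWhile (fun x => x == v)).length + 1) v).foldl (stepA k) d) := by
            conv_lhs => rw [show v :: rest
              = List.replicate ((rest.takeWhile (fun x => x == v)).length + 1) v ++ rest.dropWhile (fun x => x == v) by
                rw [← takeWhile_all_eq]; rw [List.cons_append, ← hsplit]]
            rw [List.foldl_append]
          simp only [bGo]
          by_cases hguard : opens ≠ [] ∧ (v ≠ prev + 1 ∨ (rest.takeWhile (fun x => x == v)).length + 1 < opens.length)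
          · rw [if_pos hguard]
            obtain ⟨hop, hor⟩ := hguard
            have hopnil : d.getD prev [] ≠ [] := fun h => hop ((h ▸ hperm).symm.eq_nil)
            have hprevlt : prev < v := hfar hop v (by simp)
            by_cases hvp : v = prev + 1
            · have hlen : (rest.takeWhile (fun x => x == v)).length + 1 < opens.length := by
                rcases hor with h | h
                · exact absurd hvp h
                · exact h
              have hprev : prev = v - 1 := by omega
              subst hprev
              obtain ⟨dnd, dout, dmain⟩ := drain k v ((rest.takeWhile (fun x => x == v)).length + 1) d hnd
                (fun key h1 _ => hout key h1)
              have hcond : (rest.takeWhile (fun x => x == v)).length + 1 < (d.getD (v-1) []).length := by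
                rw [hperm.length_eq]; exact hlen
              rw [if_pos hcond] at dmain
              rw [hfold]
              refine dead k (v-1) _ _ dnd (fun x hx => by have := hgt x hx; omega) ?_
              intro hx
              rw [hx] at dmain
              simp only [List.length_nil] at dmain
              omega
            · exact dead k prev (v :: rest) d hnd
                (fun x hx => by
                  rcases List.mem_cons.mp hx with rfl | hx
                  · omega
                  · have := hprest.1 x hx; omega)
                hopnil
          · rw [if_neg hguard]
            by_cases hop : opens = []
            · subst hop
              have hnil : d.getD prev [] = [] := hperm.eq_nil
              have hallnil : ∀ key, d.getD key [] = [] := by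
                intro key
                by_cases hk : key = prev
                · rw [hk]; exact hnil
                · exact hout key hk
              obtain ⟨dnd, dout, dmain⟩ := drain k v ((rest.takeWhile (fun x => x == v)).length + 1) d hnd
                (fun key h1 _ => hallnil key)
              have hc : ¬ ((rest.takeWhile (fun x => x == v)).length + 1 < (d.getD (v-1) []).length) := by
                rw [hallnil (v-1)]; simp
              rw [if_neg hc] at dmain
              rw [hfold]
              refine ih _ hL' hrest'p _ v _ dnd ?_ ?_ (fun _ x hx => hgt x hx)
              · intro key hk
                by_cases hk1 : key = v - 1
                · rw [hk1]; exact dmain.1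
                · exact dout key hk1 hk
              · have h1 := dmain.2
                rw [hallnil v, hallnil (v-1)] at h1
                simpa using h1
            · have h2 : v = prev + 1 ∧ ¬ ((rest.takeWhile (fun x => x == v)).length + 1 < opens.length) := by
                have hno := (not_and.mp hguard) hop
                rw [not_or] at hno
                exact ⟨by_contra (fun hx => hno.1 hx), hno.2⟩
              obtain ⟨hvp, hlen⟩ := h2
              have hprev : prev = v - 1 := by omega
              subst hprev
              obtain ⟨dnd, dout, dmain⟩ := drain k v ((rest.takeWhile (fun x => x == v)).length + 1) d hnd
                (fun key h1 _ => hout key h1)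
              have hc : ¬ ((rest.takeWhile (fun x => x == v)).length + 1 < (d.getD (v-1) []).length) := by
                rw [hperm.length_eq]; exact hlen
              rw [if_neg hc] at dmain
              have haccnil : d.getD v [] = [] := hout v (by omega)
              rw [hfold]
              refine ih _ hL' hrest'p _ v _ dnd ?_ ?_ (fun _ x hx => hgt x hx)
              · intro key hk
                by_cases hk1 : key = v - 1
                · rw [hk1]; exact dmain.1
                · exact dout key hk1 hk
              · have h1 := dmain.2
                rw [haccnil] at h1
                refine h1.trans ?_
                simp only [List.nil_append]
                have hap : (((d.getD (v-1) []).map (· + 1)) ++ List.replicate ((rest.takeWhile (fun x => x == v)).length + 1 - (d.getD (v-1) []).length) 1).Perm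
                    ((opens.map (· + 1)) ++ List.replicate ((rest.takeWhile (fun x => x == v)).length + 1 - opens.length) 1) := by
                  rw [hperm.length_eq]
                  exact (hperm.map (· + 1)).append_right _
                exact hap.filter _

-- ===== VERDICT (by name: the statement is the Claim_ definition above) =====
theorem isPossible_spec : Claim_equal_isPossible := by
  intro nums k _
  unfold Spec_isPossible isPossible isPossible_alt
  exact (main_sim k (PySem.List.sorted nums (fun x => x) false).length _ le_rfl
    (by simpa using PySem.List.sorted_pairwise nums (fun x => x))
    PySem.Dict.empty 0 [] (by simp)
    (by intro key _; simp [PySem.Dict.getD_empty]) (by simp [PySem.Dict.getD_empty])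
    (by intro h; exact absurd rfl h))
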